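-- pv_equiv track=rewrite | github.com/ArpithaJK4/Hackerearth_solutions | FaverotSinger.py | count_favourite_singers
-- ===== SOURCE A (Python) =====
-- def count_favourite_singers(n, singers):
--     singer_counts = {}
--     for singer in singers:
--         if singer in singer_counts:
--             singer_counts[singer] += 1
--         else:
--             singer_counts[singer] = 1
--
--     max_count = max(singer_counts.values())
--     favourite_singers = sum(1 for count in singer_counts.values() if count == max_count)
--
--     return favourite_singers
-- ===== SOURCE B (Python) =====
-- def count_favourite_singers(n, singers):
--     # Sort, then run-length scan over equal neighbours; no dict.
--     sizes = []
--     run = 0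
--     prev = None
--     for s in sorted(singers):
--         if run and prev == s:
--             run += 1
--         else:
--             if run:
--                 sizes.append(run)
--             run = 1
--             prev = s
--     if run:
--         sizes.append(run)
--     best = max(sizes)
--     return sum(1 for c in sizes if c == best)
-- ===== Notes on version B (the rewrite author's own statement) =====
-- stated objective: alternative
-- what changed: Replaces the hash-map counting loop by sorting a copy and run-length scanning equal neighbours, then the same max/tie count over the run sizes.
import Mathlib
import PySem

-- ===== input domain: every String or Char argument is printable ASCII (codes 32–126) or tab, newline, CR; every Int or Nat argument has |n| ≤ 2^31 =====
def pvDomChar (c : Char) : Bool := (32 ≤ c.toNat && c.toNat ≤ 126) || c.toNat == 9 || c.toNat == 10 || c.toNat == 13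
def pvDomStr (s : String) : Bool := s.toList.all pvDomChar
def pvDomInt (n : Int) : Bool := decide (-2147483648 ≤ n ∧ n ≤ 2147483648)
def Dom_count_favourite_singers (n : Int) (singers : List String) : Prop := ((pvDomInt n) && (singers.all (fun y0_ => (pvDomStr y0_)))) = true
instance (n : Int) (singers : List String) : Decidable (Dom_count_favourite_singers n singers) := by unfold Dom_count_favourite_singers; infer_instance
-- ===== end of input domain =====

-- ===== PORT A =====
-- header: B drops A's dict — it sorts a copy and run-length scans equal neighbours; alternative decomposition, same results.
-- helper: A's counting loop (Python's singer_counts dict)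
def pvCountDictA (singers : List String) : PySem.Dict String Int :=
  singers.foldl
    (fun d s => if d.contains s then d.insert s (d.getD s 0 + 1) else d.insert s 1)
    PySem.Dict.empty

def count_favourite_singers (n : Int) (singers : List String) : Int :=
  match PySem.List.max? (pvCountDictA singers).values (fun c => c) with
  | none => 0   -- unreachable: Python raises ValueError here (empty singers), excluded by Pre_
  | some m => (pvCountDictA singers).values.foldl (fun acc c => if c == m then acc + 1 else acc) 0

-- ===== PORT B =====
-- helpers: B's loop body over (sizes, run, prev), its trailing flush, and the run-size list of sorted(singers)
def pvStepB (st : List Int × Int × Option String) (s : String) : List Int × Int × Option String :=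
  if st.2.1 ≠ 0 ∧ st.2.2 = some s then (st.1, st.2.1 + 1, st.2.2)
  else ((if st.2.1 ≠ 0 then st.1 ++ [st.2.1] else st.1), 1, some s)

def pvFinishB (st : List Int × Int × Option String) : List Int :=
  if st.2.1 ≠ 0 then st.1 ++ [st.2.1] else st.1

def pvRunsB (xs : List String) : List Int :=
  pvFinishB (xs.foldl pvStepB ([], 0, none))

def pvSizesB (singers : List String) : List Int :=
  pvRunsB (PySem.List.sorted singers (fun x => x) false)

def count_favourite_singers_alt (n : Int) (singers : List String) : Int :=
  match PySem.List.max? (pvSizesB singers) (fun c => c) with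
  | none => 0   -- unreachable: max([]) raises ValueError in B too, excluded by Pre_
  | some m => (pvSizesB singers).foldl (fun acc c => if c == m then acc + 1 else acc) 0

-- ===== PRECONDITION & SPEC =====
-- Pre_ excludes only empty singers, where both Pythons raise ValueError (max of an empty sequence).
def Pre_count_favourite_singers (n : Int) (singers : List String) : Prop := singers ≠ []
instance (n : Int) (singers : List String) : Decidable (Pre_count_favourite_singers n singers) := by unfold Pre_count_favourite_singers; infer_instance
def pvWitness_count_favourite_singers : Int × List String := (3, ["a", "b", "a"])

def Spec_count_favourite_singers (n : Int) (singers : List String) (out : Int) : Prop := out = count_favourite_singers_alt n singers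
instance (n : Int) (singers : List String) (out : Int) : Decidable (Spec_count_favourite_singers n singers out) := by unfold Spec_count_favourite_singers; infer_instance

-- ===== CLAIM (what is proved, stated in full; the proofs are below) =====
def Claim_equal_count_favourite_singers : Prop := ∀ (n : Int) (singers : List String), Dom_count_favourite_singers n singers → Pre_count_favourite_singers n singers → Spec_count_favourite_singers n singers (count_favourite_singers n singers)

-- ===== LEMMAS AND PROOFS =====

-- A's counting loop builds Counter(singers)
theorem countDictA_eq_counter (singers : List String) :
    pvCountDictA singers = PySem.Dict.counter singers := by
  rw [pvCountDictA, ← PySem.Dict.foldl_insert_getD_add_one_eq_counter]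
  apply PySem.List.foldl_congr_mem
  intro acc x _
  by_cases h : acc.contains x = true
  · simp [h]
  · have h0 : acc.getD x 0 = 0 :=
      PySem.Dict.getD_of_not_contains acc 0 (by simpa using h)
    simp [h, h0]

-- A's value list is the per-singer counts over the distinct singers in first-occurrence order
theorem valuesA_eq (singers : List String) :
    (pvCountDictA singers).values
      = (PySem.Set.ofList singers).map (fun k => (singers.count k : Int)) := by
  rw [countDictA_eq_counter]
  show ((PySem.Dict.counter singers).items.map (·.2)) = _
  rw [PySem.Dict.items_counter]
  simp

-- B's loop only appends to the sizes accumulator, so a prefix factors out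
theorem stepB_shift (xs : List String) (pre : List Int) :
    ∀ (sizes : List Int) (run : Int) (prev : Option String),
    xs.foldl pvStepB (pre ++ sizes, run, prev)
      = (pre ++ (xs.foldl pvStepB (sizes, run, prev)).1,
         (xs.foldl pvStepB (sizes, run, prev)).2) := by
  induction xs with
  | nil => intro sizes run prev; simp
  | cons x t ih =>
    intro sizes run prev
    simp only [List.foldl_cons]
    by_cases h : run ≠ 0 ∧ prev = some x
    · rw [show pvStepB (pre ++ sizes, run, prev) x = (pre ++ sizes, run + 1, prev) by
        simp [pvStepB, h],
        show pvStepB (sizes, run, prev) x = (sizes, run + 1, prev) by simp [pvStepB, h]]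
      exact ih sizes (run + 1) prev
    · by_cases hr : run = 0
      · rw [show pvStepB (pre ++ sizes, run, prev) x = (pre ++ sizes, 1, some x) by
          simp [pvStepB, hr],
          show pvStepB (sizes, run, prev) x = (sizes, 1, some x) by simp [pvStepB, hr]]
        exact ih sizes 1 (some x)
      · have hpx : ¬ prev = some x := fun hp => h ⟨hr, hp⟩
        rw [show pvStepB (pre ++ sizes, run, prev) x = (pre ++ (sizes ++ [run]), 1, some x) by
          simp [pvStepB, hr, hpx],
          show pvStepB (sizes, run, prev) x = (sizes ++ [run], 1, some x) by
          simp [pvStepB, hr, hpx]]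
        exact ih (sizes ++ [run]) 1 (some x)

theorem finishB_shift (pre : List Int) (st : List Int × Int × Option String) :
    pvFinishB (pre ++ st.1, st.2) = pre ++ pvFinishB st := by
  unfold pvFinishB
  by_cases h : st.2.1 ≠ 0 <;> simp [h]

-- a run of the current element only lengthens the open run
theorem stepB_replicate (c : Nat) (a : String) :
    ∀ (sizes : List Int) (k : Int), 0 < k →
    (List.replicate c a).foldl pvStepB (sizes, k, some a) = (sizes, k + c, some a) := by
  induction c with
  | zero => intro sizes k _; simp
  | succ m ih =>
    intro sizes k hk
    rw [List.replicate_succ, List.foldl_cons,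
      show pvStepB (sizes, k, some a) a = (sizes, k + 1, some a) by simp [pvStepB, hk.ne'],
      ih sizes (k + 1) (by omega)]
    exact congrArg (fun z : Int => (sizes, z, some a)) (by push_cast; ring)

-- Set.add over an untouched prefix factors out
theorem setAdd_shift (r : List String) (pre : List String) :
    ∀ (acc : List String), (∀ y ∈ r, y ∉ pre) →
    r.foldl PySem.Set.add (pre ++ acc) = pre ++ r.foldl PySem.Set.add acc := by
  induction r with
  | nil => intro acc _; simp
  | cons y t ih =>
    intro acc hy
    simp only [List.foldl_cons]
    have hyp : y ∉ pre := hy y (by simp)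
    by_cases h : y ∈ acc
    · rw [show PySem.Set.add (pre ++ acc) y = pre ++ acc by simp [PySem.Set.add, h],
        show PySem.Set.add acc y = acc by simp [PySem.Set.add, h]]
      exact ih acc (fun z hz => hy z (by simp [hz]))
    · rw [show PySem.Set.add (pre ++ acc) y = pre ++ (acc ++ [y]) by
        simp [PySem.Set.add, hyp, h],
        show PySem.Set.add acc y = acc ++ [y] by simp [PySem.Set.add, h]]
      exact ih (acc ++ [y]) (fun z hz => hy z (by simp [hz]))

-- set(replicate ++ r) = a :: set(r) when a does not occur in r
theorem ofList_rep_append (c : Nat) (a : String) (r : List String) (h : a ∉ r) :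
    PySem.Set.ofList (List.replicate (c + 1) a ++ r) = a :: PySem.Set.ofList r := by
  rw [PySem.Set.ofList_eq_foldl, List.foldl_append]
  have hrep : (List.replicate (c + 1) a).foldl PySem.Set.add [] = [a] := by
    rw [List.replicate_succ, List.foldl_cons,
      show PySem.Set.add [] a = [a] by simp [PySem.Set.add]]
    induction c with
    | zero => simp
    | succ m ihc =>
      rw [List.replicate_succ, List.foldl_cons,
        show PySem.Set.add [a] a = [a] by simp [PySem.Set.add]]
      exact ihc
  rw [hrep, show [a] = [a] ++ ([] : List String) by simp,
    setAdd_shift r [a] [] (by intro y hy; simp; rintro rfl; exact h hy),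
    ← PySem.Set.ofList_eq_foldl]
  simp

-- run-length scan of a sorted list = per-element counts over its distinct elements
theorem runsB_grouped (xs : List String) (hs : xs.Pairwise (· ≤ ·)) :
    pvRunsB xs = (PySem.Set.ofList xs).map (fun k => (xs.count k : Int)) := by
  generalize hn : xs.length = nlen
  induction nlen using Nat.strong_induction_on generalizing xs with
  | _ nlen ih =>
  cases xs with
  | nil => rfl
  | cons a t =>
    obtain ⟨ha_le, ht_sorted⟩ := List.pairwise_cons.mp hs
    have htw : t.takeWhile (fun y => y == a) = List.replicate (t.takeWhile (fun y => y == a)).length a := by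
      rw [List.eq_replicate_iff]
      refine ⟨rfl, fun b hb => ?_⟩
      have hb' := List.mem_takeWhile_imp hb
      exact eq_of_beq hb'
    have ht : t = List.replicate (t.takeWhile (fun y => y == a)).length a ++ t.dropWhile (fun y => y == a) := by
      conv_lhs => rw [← List.takeWhile_append_dropWhile (p := fun y => y == a) (l := t)]
      rw [← htw]
    have hxs : a :: t = List.replicate ((t.takeWhile (fun y => y == a)).length + 1) a
        ++ t.dropWhile (fun y => y == a) := by
      rw [Nat.add_comm, List.replicate_add]
      simpa using ht
    generalize hc : (t.takeWhile (fun y => y == a)).length = c at *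
    generalize hrd : t.dropWhile (fun y => y == a) = r at *
    have hrt : r.Sublist t := hrd ▸ List.dropWhile_sublist (p := fun y => y == a) (l := t)
    have hr_sorted : r.Pairwise (· ≤ ·) := ht_sorted.sublist hrt
    have hr_le : ∀ y ∈ r, a ≤ y := fun y hy => ha_le y (hrt.mem hy)
    have hhead : ∀ y r', r = y :: r' → y ≠ a := by
      intro y r' hyr hya
      have h := List.head?_dropWhile_not (fun z => z == a) t
      rw [hrd, hyr] at h
      simp [hya] at h
    have har : a ∉ r := by
      intro hmem
      cases hr : r with
      | nil => rw [hr] at hmem; simp at hmem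
      | cons y r' =>
        have hya : y ≠ a := hhead y r' hr
        have h1 : a ≤ y := hr_le y (by rw [hr]; exact List.mem_cons_self)
        rw [hr] at hmem
        rcases List.mem_cons.mp hmem with h | h
        · exact hya h.symm
        · have h2 : y ≤ a := (List.pairwise_cons.mp (hr ▸ hr_sorted)).1 a h
          exact hya (le_antisymm h2 h1)
    have hfold1 : (List.replicate (c + 1) a).foldl pvStepB ([], 0, none)
        = ([], 1 + (c : Int), some a) := by
      rw [List.replicate_succ, List.foldl_cons,
        show pvStepB ([], 0, none) a = ([], 1, some a) by simp [pvStepB]]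
      exact stepB_replicate c a [] 1 one_pos
    have hpos : (1 : Int) + (c : Int) ≠ 0 := by positivity
    have hcount_a : (a :: t).count a = c + 1 := by
      rw [hxs, List.count_append, List.count_replicate, List.count_eq_zero.mpr har]
      simp
    have hcount_r : ∀ k ∈ r, (a :: t).count k = r.count k := by
      intro k hk
      have hka : ¬ (k == a) = true := by
        intro hb; exact har (eq_of_beq hb ▸ hk)
      rw [hxs, List.count_append, List.count_replicate]
      have hka' : ¬ a = k := fun h => hka (by simp [h])
      simp [hka']
    cases hr : r with
    | nil =>
      subst hr
      rw [pvRunsB, hxs, List.append_nil, hfold1,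
        show pvFinishB ([], 1 + (c : Int), some a) = [1 + (c : Int)] by
          simp [pvFinishB, hpos],
        show PySem.Set.ofList (List.replicate (c + 1) a) = [a] from
          by simpa using ofList_rep_append c a [] (by simp)]
      simp [List.count_replicate]
      ring
    | cons y r' =>
      have hya : y ≠ a := hhead y r' hr
      have IH := ih r.length (by
          rw [← hn, ← hrd]
          exact Nat.lt_succ_of_le (List.length_dropWhile_le _ _)) r hr_sorted rfl
      have hshift : r.foldl pvStepB ([], 1 + (c : Int), some a)
          = ([1 + (c : Int)] ++ (r.foldl pvStepB ([], 0, none)).1,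
             (r.foldl pvStepB ([], 0, none)).2) := by
        rw [hr, List.foldl_cons, List.foldl_cons,
          show pvStepB ([], 1 + (c : Int), some a) y = ([1 + (c : Int)], 1, some y) by
            simp [pvStepB, hpos, Ne.symm hya],
          show pvStepB ([], 0, none) y = ([], 1, some y) by simp [pvStepB]]
        have := stepB_shift r' [1 + (c : Int)] [] 1 (some y)
        simpa using this
      rw [pvRunsB, hxs, List.foldl_append, hfold1, hshift, finishB_shift,
        ofList_rep_append c a r har, List.map_cons,
        show ((List.replicate (c + 1) a ++ r).count a : Int) = 1 + (c : Int) by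
          rw [← hxs, hcount_a]
          push_cast
          ring,
        List.map_congr_left (fun k hk => by
          rw [← hxs, hcount_r k ((PySem.Set.mem_ofList _ k).mp hk)])]
      rw [← pvRunsB, IH]
      rfl

-- the max-then-tie-count tail is invariant under permutation of the count list
theorem tieCount_perm (v w : List Int) (h : v.Perm w) :
    (match PySem.List.max? v (fun c => c) with
     | none => (0 : Int)
     | some m => v.foldl (fun acc c => if c == m then acc + 1 else acc) 0)
    = (match PySem.List.max? w (fun c => c) with
       | none => (0 : Int)
       | some m => w.foldl (fun acc c => if c == m then acc + 1 else acc) 0) := by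
  cases hv : PySem.List.max? v (fun c => c) with
  | none =>
    have hv' : v = [] := (PySem.List.max?_eq_none_iff _ _).mp hv
    have hw' : w = [] := (h.symm.trans (hv' ▸ List.Perm.refl v)).eq_nil
    subst hv'; subst hw'
    rfl
  | some m =>
    have hm := PySem.List.max?_mem hv
    have hmax := PySem.List.max?_isMax hv
    cases hw : PySem.List.max? w (fun c => c) with
    | none =>
      have hw' : w = [] := (PySem.List.max?_eq_none_iff _ _).mp hw
      subst hw'
      have hv' : v = [] := h.eq_nil
      subst hv'
      have hnone : PySem.List.max? ([] : List Int) (fun c => c) = none :=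
        (PySem.List.max?_eq_none_iff _ _).mpr rfl
      rw [hnone] at hv
      simp at hv
    | some m' =>
      have hm' := PySem.List.max?_mem hw
      have hmax' := PySem.List.max?_isMax hw
      have hmm : m = m' := le_antisymm (hmax' m (h.subset hm)) (hmax m' (h.symm.subset hm'))
      subst hmm
      show v.foldl (fun acc c => if c == m then acc + 1 else acc) 0
        = w.foldl (fun acc c => if c == m then acc + 1 else acc) 0
      rw [PySem.List.foldl_beq_add_one, PySem.List.foldl_beq_add_one, h.count_eq]

-- B's run sizes are a permutation of A's dict values
theorem sizesB_perm_valuesA (singers : List String) :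
    ((pvCountDictA singers).values).Perm (pvSizesB singers) := by
  rw [valuesA_eq, pvSizesB,
    runsB_grouped (PySem.List.sorted singers (fun x => x) false)
      (by simpa using PySem.List.sorted_pairwise (xs := singers) (key := fun x => x))]
  have hp : (PySem.List.sorted singers (fun x => x) false).Perm singers :=
    PySem.List.sorted_perm (xs := singers) (key := fun x => x) (rev := false)
  rw [List.map_congr_left (fun k (_ : k ∈ PySem.Set.ofList
      (PySem.List.sorted singers (fun x => x) false)) => by rw [hp.count_eq])]
  apply List.Perm.map
  refine (List.perm_ext_iff_of_nodup (PySem.Set.nodup_ofList _) (PySem.Set.nodup_ofList _)).mpr ?_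
  intro k
  rw [PySem.Set.mem_ofList, PySem.Set.mem_ofList]
  exact hp.mem_iff.symm

-- ===== VERDICT (by name: the statement is the Claim_ definition above) =====
theorem count_favourite_singers_spec : Claim_equal_count_favourite_singers := by
  intro n singers _ _
  unfold Spec_count_favourite_singers count_favourite_singers count_favourite_singers_alt
  exact tieCount_perm _ _ (sizesB_perm_valuesA singers)
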